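-- pv_equiv track=rewrite | github.com/MrBrantCode/unitest_baseline | mut_generate/mist_train_cf/cf_88654/solution.py | string_formatter
-- ===== SOURCE A (Python) =====
-- def string_formatter(s):
--     words = []
--     word = ''
--     for char in s:
--         if char.isalpha():
--             word += char.lower()
--         elif word:
--             words.append(word)
--             word = ''
--     if word:
--         words.append(word)
--
--     unique_words = []
--     for word in words:
--         if word not in unique_words:
--             unique_words.append(word)
--
--     sorted_words = sorted(unique_words)
--     return sorted_words
-- ===== SOURCE B (Python) =====
-- def string_formatter(s):
--     translated = ''.join(c.lower() if c.isalpha() else ' ' for c in s)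
--     return sorted(set(translated.split()))
-- ===== Notes on version B (the rewrite author's own statement) =====
-- stated objective: idiomatic
-- what changed: B replaces the accumulator/flush state machine and the quadratic membership-scan dedup with translate-nonalpha-to-space + str.split() + sorted(set(...)).
import Mathlib
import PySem

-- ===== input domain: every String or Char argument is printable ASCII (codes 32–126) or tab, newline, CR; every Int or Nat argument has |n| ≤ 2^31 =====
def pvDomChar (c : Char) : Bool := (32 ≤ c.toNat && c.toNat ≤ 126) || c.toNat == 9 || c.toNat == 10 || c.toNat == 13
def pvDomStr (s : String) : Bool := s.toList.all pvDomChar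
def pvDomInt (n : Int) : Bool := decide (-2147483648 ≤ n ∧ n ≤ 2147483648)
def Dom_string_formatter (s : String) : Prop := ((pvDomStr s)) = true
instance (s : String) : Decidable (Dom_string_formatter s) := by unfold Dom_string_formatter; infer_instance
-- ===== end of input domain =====

-- B replaces A's accumulator/flush state machine and quadratic list dedup by
-- translate-nonalpha-to-space + split() + sorted(set(...)); same return value (idiomatic rewrite).

-- ===== PORT A =====
-- A's char loop: state (words, word); the word grows on alpha chars and is flushed on a
-- non-alpha char (and once at the end); then first-occurrence dedup by membership scan; then sort.
def string_formatter (s : String) : List String :=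
  let st := s.toList.foldl
    (fun (st : List String × List Char) c =>
      if PySem.Chars.isalpha c then (st.1, st.2 ++ [PySem.Chars.lowerChar c])
      else if st.2 ≠ [] then (st.1 ++ [String.ofList st.2], ([] : List Char))
      else st)
    ([], [])
  let words := if st.2 ≠ [] then st.1 ++ [String.ofList st.2] else st.1
  let unique := words.foldl (fun acc w => if w ∈ acc then acc else acc ++ [w]) []
  PySem.List.sorted unique (fun x => x) false

-- ===== PORT B =====
-- B: every non-alpha char becomes ' ', alpha chars are lowercased; then split / set / sorted.
def string_formatter_alt (s : String) : List String :=
  let translated := String.ofList (s.toList.map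
    (fun c => if PySem.Chars.isalpha c then PySem.Chars.lowerChar c else ' '))
  PySem.List.sorted (PySem.Set.ofList (PySem.Str.split₀ translated)) (fun x => x) false

-- ===== PRECONDITION & SPEC =====
def Spec_string_formatter (s : String) (out : List String) : Prop := out = string_formatter_alt s
instance (s : String) (out : List String) : Decidable (Spec_string_formatter s out) := by unfold Spec_string_formatter; infer_instance

-- ===== CLAIM (what is proved, stated in full; the proofs are below) =====
def Claim_equal_string_formatter : Prop := ∀ (s : String), Dom_string_formatter s → Spec_string_formatter s (string_formatter s)

-- ===== LEMMAS AND PROOFS =====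

lemma isspace_eq_false (d : Char) (h1 : 33 ≤ d.toNat) (h2 : d.toNat ≤ 126) :
    PySem.Chars.isspace d = false := by
  simp only [PySem.Chars.isspace, Bool.or_eq_false_iff, Bool.and_eq_false_iff,
    decide_eq_false_iff_not]
  omega

lemma toNat_lower_alpha (c : Char) (h : PySem.Chars.isalpha c = true) :
    97 ≤ (PySem.Chars.lowerChar c).toNat ∧ (PySem.Chars.lowerChar c).toNat ≤ 122 := by
  simp only [PySem.Chars.isalpha, PySem.Chars.isupper, PySem.Chars.islower, Bool.or_eq_true,
    Bool.and_eq_true, decide_eq_true_eq, Char.le_def, UInt32.le_iff_toNat_le] at h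
  unfold PySem.Chars.lowerChar PySem.Chars.isupper
  have hA : ('A' : Char).val.toNat = 65 := by decide
  have hZ : ('Z' : Char).val.toNat = 90 := by decide
  have ha : ('a' : Char).val.toNat = 97 := by decide
  have hz : ('z' : Char).val.toNat = 122 := by decide
  have hct : ∀ d : Char, d.toNat = d.val.toNat := fun _ => rfl
  rcases h with ⟨h1, h2⟩ | ⟨h1, h2⟩
  · rw [if_pos (by simp only [Char.le_def, UInt32.le_iff_toNat_le, Bool.and_eq_true,
      decide_eq_true_eq]; omega)]
    rw [← hct c] at h1 h2
    have hv : (Char.ofNat (c.toNat + 32)).toNat = c.toNat + 32 := by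
      rw [Char.toNat_ofNat, if_pos (Or.inl (by omega))]
    rw [hv]
    omega
  · by_cases hu : (decide ('A' ≤ c) && decide (c ≤ 'Z')) = true
    · simp only [Char.le_def, UInt32.le_iff_toNat_le, Bool.and_eq_true, decide_eq_true_eq] at hu
      rw [← hct c] at h1 h2 hu; omega
    · rw [if_neg hu]; rw [← hct c] at h1 h2; omega

lemma isspace_trc (c : Char) :
    PySem.Chars.isspace (if PySem.Chars.isalpha c then PySem.Chars.lowerChar c else ' ')
      = !PySem.Chars.isalpha c := by
  by_cases h : PySem.Chars.isalpha c = true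
  · rw [if_pos h, h]
    obtain ⟨h1, h2⟩ := toNat_lower_alpha c h
    exact isspace_eq_false _ (by omega) (by omega)
  · rw [if_neg h, Bool.eq_false_iff.mpr h]
    decide

def stepA (st : List String × List Char) (c : Char) : List String × List Char :=
  if PySem.Chars.isalpha c then (st.1, st.2 ++ [PySem.Chars.lowerChar c])
  else if st.2 ≠ [] then (st.1 ++ [String.ofList st.2], ([] : List Char))
  else st

lemma go_spec : ∀ (cs : List Char) (ws : List String) (w : List Char),
    PySem.Chars.split₀.go
        (cs.map (fun c => if PySem.Chars.isalpha c then PySem.Chars.lowerChar c else ' '))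
        w.reverse ((ws.map String.toList).reverse)
      = ((let st := cs.foldl stepA (ws, w);
          if st.2 ≠ [] then st.1 ++ [String.ofList st.2] else st.1).map String.toList) := by
  intro cs
  induction cs with
  | nil =>
    intro ws w
    simp only [List.map_nil, List.foldl_nil, PySem.Chars.split₀.go]
    by_cases hw : w = []
    · simp [hw]
    · simp [hw, List.isEmpty_iff]
  | cons c cs ih =>
    intro ws w
    simp only [List.map_cons, List.foldl_cons, PySem.Chars.split₀.go, isspace_trc]
    by_cases h : PySem.Chars.isalpha c = true
    · simp only [h, Bool.not_true, Bool.false_eq_true, if_false, if_true]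
      have harg : PySem.Chars.lowerChar c :: w.reverse
          = (w ++ [PySem.Chars.lowerChar c]).reverse := by simp
      rw [harg, ih ws (w ++ [PySem.Chars.lowerChar c])]
      simp [stepA, h]
    · simp only [Bool.eq_false_iff.mpr h, Bool.not_false, if_true, Bool.false_eq_true, if_false]
      by_cases hw : w = []
      · subst hw
        simp only [List.reverse_nil, List.isEmpty_nil, if_true]
        have := ih ws []
        simp only [List.reverse_nil] at this
        rw [this]
        simp [stepA, h]
      · rw [if_neg (by simp [List.isEmpty_iff, hw])]
        have hacc : w.reverse.reverse :: (ws.map String.toList).reverse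
            = (((ws ++ [String.ofList w]).map String.toList).reverse) := by
          simp
        rw [hacc]
        have := ih (ws ++ [String.ofList w]) []
        simp only [List.reverse_nil] at this
        rw [this]
        simp [stepA, h, hw]

lemma toList_injective : Function.Injective String.toList := by
  intro a b h
  rw [← @String.ofList_toList a, h, @String.ofList_toList]

lemma dedup_foldl : ∀ (l acc : List String),
    l.foldl (fun acc w => if w ∈ acc then acc else acc ++ [w]) acc
      = l.foldl PySem.Set.add acc := by
  intro l
  induction l with
  | nil => intro acc; rfl
  | cons x l ih =>
    intro acc
    simp only [List.foldl_cons, ih, PySem.Set.add, PySem.Set.contains, List.contains_eq_mem,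
      decide_eq_true_eq]

lemma main_eq (s : String) : string_formatter s = string_formatter_alt s := by
  have hA : string_formatter s = PySem.List.sorted
      ((if (s.toList.foldl stepA ([], [])).2 ≠ [] then
          (s.toList.foldl stepA ([], [])).1 ++ [String.ofList (s.toList.foldl stepA ([], [])).2]
        else (s.toList.foldl stepA ([], [])).1).foldl
        (fun acc w => if w ∈ acc then acc else acc ++ [w]) []) (fun x => x) false := rfl
  have hB : string_formatter_alt s = PySem.List.sorted
      (PySem.Set.ofList (PySem.Str.split₀ (String.ofList (s.toList.map
        (fun c => if PySem.Chars.isalpha c then PySem.Chars.lowerChar c else ' ')))))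
      (fun x => x) false := rfl
  have hmap : (PySem.Str.split₀ (String.ofList (s.toList.map
        (fun c => if PySem.Chars.isalpha c then PySem.Chars.lowerChar c else ' ')))).map String.toList
      = ((if (s.toList.foldl stepA ([], [])).2 ≠ [] then
          (s.toList.foldl stepA ([], [])).1 ++ [String.ofList (s.toList.foldl stepA ([], [])).2]
        else (s.toList.foldl stepA ([], [])).1).map String.toList) := by
    rw [PySem.Str.split₀_map_toList, String.toList_ofList]
    simpa using go_spec s.toList [] []
  have hwords := List.map_injective_iff.mpr toList_injective hmap
  rw [hA, hB, dedup_foldl, ← PySem.Set.ofList_eq_foldl, ← hwords]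

-- ===== VERDICT (by name: the statement is the Claim_ definition above) =====
theorem string_formatter_spec : Claim_equal_string_formatter := by
  intro s _
  unfold Spec_string_formatter
  exact main_eq s
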